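-- pv_equiv track=rewrite | github.com/MrBrantCode/unitest_baseline | mut_generate/mist_train_taco/taco_1479/solution.py | minimum_cost_to_sort_permutation
-- ===== SOURCE A (Python) =====
-- def minimum_cost_to_sort_permutation(N, P):
--     def swap_with_next_negative(arr, ind, curswaps=[]):
--         x = arr[ind]
--         for i in range(ind, len(arr)):
--             if arr[i] < 0:
--                 y = arr[i]
--                 arr[i] = x - (i - ind)
--                 arr[ind] = y + (i - ind)
--                 curswaps.append([ind + 1, i + 1])
--                 if arr[i] > 0:
--                     (arr, curswaps) = swap_with_next_negative(arr, i, curswaps)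
--                 return (arr, curswaps)
--         return (arr, curswaps)
--
--     D = [P[i - 1] - i for i in range(1, N + 1)]
--     sum_ = sum([X for X in D if X > 0])
--     swaps = []
--     for z in range(N - 1, -1, -1):
--         if D[z] > 0:
--             (D, swaps_) = swap_with_next_negative(D, z, [])
--             swaps += swaps_
--
--     return sum_, swaps
-- ===== SOURCE B (Python) =====
-- def minimum_cost_to_sort_permutation(N, P):
--     D = [P[i - 1] - i for i in range(1, N + 1)]
--     total = sum(x for x in D if x > 0)
--     swaps = []
--     for z in range(N - 1, -1, -1):
--         if D[z] > 0:
--             ind = z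
--             x = D[ind]
--             i = ind + 1
--             while i < len(D):
--                 if D[i] < 0:
--                     y = D[i]
--                     D[i] = x - (i - ind)
--                     D[ind] = y + (i - ind)
--                     swaps.append([ind + 1, i + 1])
--                     if D[i] > 0:
--                         ind = i
--                         x = D[i]
--                     else:
--                         break
--                 i += 1
--     return total, swaps
-- ===== Notes on version B (the rewrite author's own statement) =====
-- stated objective: simpler
-- what changed: Replaces the recursive helper swap_with_next_negative (which re-enters itself and threads a per-call swap list merged with '+=') by a single explicit iterative while-loop that advances one index pointer and appends swaps directly to the global list.
import Mathlib
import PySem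

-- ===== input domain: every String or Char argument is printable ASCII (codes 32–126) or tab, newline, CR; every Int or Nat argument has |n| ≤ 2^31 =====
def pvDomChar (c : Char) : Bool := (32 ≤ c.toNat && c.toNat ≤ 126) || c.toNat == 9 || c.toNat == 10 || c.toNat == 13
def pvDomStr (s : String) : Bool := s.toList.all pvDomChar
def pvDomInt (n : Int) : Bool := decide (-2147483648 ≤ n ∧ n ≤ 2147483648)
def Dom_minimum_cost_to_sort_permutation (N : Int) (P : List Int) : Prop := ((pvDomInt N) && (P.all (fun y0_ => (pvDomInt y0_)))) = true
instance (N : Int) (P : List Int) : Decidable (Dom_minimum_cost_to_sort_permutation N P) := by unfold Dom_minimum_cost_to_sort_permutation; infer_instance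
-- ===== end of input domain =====

-- B replaces A's recursive swap helper (with its per-call swap list merged by '+=') by one
-- iterative while-loop appending directly to the global swap list; objective: simpler.

-- ===== PORT A =====
-- the 'for i in range(ind, len(arr))' scan of A's helper: first index i ≥ start with arr[i] < 0
def pvFirstNegA (arr : List Int) (i : Nat) : Option Nat :=
  if h : i < arr.length then
    if arr.getD i 0 < 0 then some i else pvFirstNegA arr (i + 1)
  else none
termination_by arr.length - i

-- A's recursive swap_with_next_negative; fuel bounds the self-recursion depth (each re-entry
-- strictly increases ind, so fuel = arr.length + 1 is never exhausted on the calls A makes)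
def pvSwapA (fuel : Nat) (arr : List Int) (ind : Nat) (curswaps : List (List Int)) :
    List Int × List (List Int) :=
  match fuel with
  | 0 => (arr, curswaps)
  | fuel + 1 =>
    let x := arr.getD ind 0
    match pvFirstNegA arr ind with
    | none => (arr, curswaps)
    | some i =>
      let y := arr.getD i 0
      let arr2 := (arr.set i (x - ((i : Int) - (ind : Int)))).set ind (y + ((i : Int) - (ind : Int)))
      let cs := curswaps ++ [[(ind : Int) + 1, (i : Int) + 1]]
      if arr2.getD i 0 > 0 then pvSwapA fuel arr2 i cs else (arr2, cs)

-- body of A's outer 'for z in range(N-1,-1,-1)' loop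
def pvStepA (st : List Int × List (List Int)) (z : Int) : List Int × List (List Int) :=
  if st.1.getD z.toNat 0 > 0 then
    let r := pvSwapA (st.1.length + 1) st.1 z.toNat []
    (r.1, st.2 ++ r.2)
  else st

def minimum_cost_to_sort_permutation (N : Int) (P : List Int) : Int × List (List Int) :=
  let D := (PySem.List.pyRange 1 (N + 1) 1).map (fun i => P.getD (i - 1).toNat 0 - i)
  let sum_ := (D.filter (fun X => X > 0)).sum
  let res := (PySem.List.pyRange (N - 1) (-1) (-1)).foldl pvStepA (D, [])
  (sum_, res.2)

-- ===== PORT B =====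
-- B's single while-loop: scan i forward, swap at each negative, re-anchor ind while the
-- landed value stays positive, break otherwise
def pvLoopB (arr : List Int) (ind : Nat) (x : Int) (i : Nat) (swaps : List (List Int)) :
    List Int × List (List Int) :=
  if h : i < arr.length then
    if arr.getD i 0 < 0 then
      let y := arr.getD i 0
      let arr2 := (arr.set i (x - ((i : Int) - (ind : Int)))).set ind (y + ((i : Int) - (ind : Int)))
      let sw := swaps ++ [[(ind : Int) + 1, (i : Int) + 1]]
      if arr2.getD i 0 > 0 then pvLoopB arr2 i (arr2.getD i 0) (i + 1) sw
      else (arr2, sw)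
    else pvLoopB arr ind x (i + 1) swaps
  else (arr, swaps)
termination_by arr.length - i
decreasing_by
  · simp only [List.length_set]; omega
  · omega

-- body of B's outer loop
def pvStepB (st : List Int × List (List Int)) (z : Int) : List Int × List (List Int) :=
  if st.1.getD z.toNat 0 > 0 then
    pvLoopB st.1 z.toNat (st.1.getD z.toNat 0) (z.toNat + 1) st.2
  else st

def minimum_cost_to_sort_permutation_alt (N : Int) (P : List Int) : Int × List (List Int) :=
  let D := (PySem.List.pyRange 1 (N + 1) 1).map (fun i => P.getD (i - 1).toNat 0 - i)
  let total := D.foldl (fun a x => if x > 0 then a + x else a) 0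
  let res := (PySem.List.pyRange (N - 1) (-1) (-1)).foldl pvStepB (D, [])
  (total, res.2)

-- ===== PRECONDITION & SPEC =====
-- A raises IndexError (P[i-1] in the comprehension) when N > len(P); exactly that is excluded.
def Pre_minimum_cost_to_sort_permutation (N : Int) (P : List Int) : Prop := N ≤ (P.length : Int)
instance (N : Int) (P : List Int) : Decidable (Pre_minimum_cost_to_sort_permutation N P) := by
  unfold Pre_minimum_cost_to_sort_permutation; infer_instance
def pvWitness_minimum_cost_to_sort_permutation : Int × List Int := (3, [3, 1, 2])

def Spec_minimum_cost_to_sort_permutation (N : Int) (P : List Int) (out : Int × List (List Int)) : Prop := out = minimum_cost_to_sort_permutation_alt N P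
instance (N : Int) (P : List Int) (out : Int × List (List Int)) : Decidable (Spec_minimum_cost_to_sort_permutation N P out) := by unfold Spec_minimum_cost_to_sort_permutation; infer_instance

-- ===== CLAIM (what is proved, stated in full; the proofs are below) =====
def Claim_equal_minimum_cost_to_sort_permutation : Prop := ∀ (N : Int) (P : List Int), Dom_minimum_cost_to_sort_permutation N P → Pre_minimum_cost_to_sort_permutation N P → Spec_minimum_cost_to_sort_permutation N P (minimum_cost_to_sort_permutation N P)

-- ===== LEMMAS AND PROOFS =====

theorem pv_sum_foldl (D : List Int) :
    ∀ a : Int, D.foldl (fun a x => if x > 0 then a + x else a) a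
      = a + (D.filter (fun X => X > 0)).sum := by
  induction D with
  | nil => intro a; simp
  | cons x t ih =>
      intro a
      by_cases hx : x > 0
      · simp [List.foldl, List.filter, hx, ih]; ring
      · simp [List.foldl, List.filter, hx, ih]

theorem pv_fn_none_loop_aux (arr : List Int) (ind : Nat) (x : Int) (s : List (List Int)) :
    ∀ (n j : Nat), arr.length - j ≤ n → pvFirstNegA arr j = none → pvLoopB arr ind x j s = (arr, s) := by
  intro n
  induction n with
  | zero =>
      intro j hn hc
      rw [pvLoopB, dif_neg (by omega)]
  | succ n ih =>
      intro j hn hc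
      by_cases h : j < arr.length
      · rw [pvFirstNegA, dif_pos h] at hc
        by_cases hneg : arr.getD j 0 < 0
        · rw [if_pos hneg] at hc; cases hc
        · rw [if_neg hneg] at hc
          rw [pvLoopB]
          simp only [h, dif_pos, if_neg hneg]
          exact ih (j + 1) (by omega) hc
      · rw [pvLoopB, dif_neg h]

theorem pv_fn_none_loop (arr : List Int) (ind : Nat) (x : Int) (s : List (List Int))
    (j : Nat) (hc : pvFirstNegA arr j = none) : pvLoopB arr ind x j s = (arr, s) :=
  pv_fn_none_loop_aux arr ind x s (arr.length - j) j (le_refl _) hc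

theorem pv_fn_some_skip_aux (arr : List Int) (ind : Nat) (x : Int) (s : List (List Int)) :
    ∀ (n j i : Nat), arr.length - j ≤ n → pvFirstNegA arr j = some i →
      pvLoopB arr ind x j s = pvLoopB arr ind x i s := by
  intro n
  induction n with
  | zero =>
      intro j i hn hc
      rw [pvFirstNegA, dif_neg (by omega)] at hc; cases hc
  | succ n ih =>
      intro j i hn hc
      by_cases h : j < arr.length
      · rw [pvFirstNegA, dif_pos h] at hc
        by_cases hneg : arr.getD j 0 < 0
        · rw [if_pos hneg] at hc; cases hc; rfl
        · rw [if_neg hneg] at hc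
          rw [pvLoopB]
          simp only [h, dif_pos, if_neg hneg]
          exact ih (j + 1) i (by omega) hc
      · rw [pvFirstNegA, dif_neg h] at hc; cases hc

theorem pv_fn_some_skip (arr : List Int) (ind : Nat) (x : Int) (s : List (List Int))
    (j i : Nat) (hc : pvFirstNegA arr j = some i) :
    pvLoopB arr ind x j s = pvLoopB arr ind x i s :=
  pv_fn_some_skip_aux arr ind x s (arr.length - j) j i (le_refl _) hc

theorem pv_fn_some_props_aux (arr : List Int) :
    ∀ (n j i : Nat), arr.length - j ≤ n → pvFirstNegA arr j = some i →
      j ≤ i ∧ i < arr.length ∧ arr.getD i 0 < 0 := by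
  intro n
  induction n with
  | zero =>
      intro j i hn hc
      rw [pvFirstNegA, dif_neg (by omega)] at hc; cases hc
  | succ n ih =>
      intro j i hn hc
      by_cases h : j < arr.length
      · rw [pvFirstNegA, dif_pos h] at hc
        by_cases hneg : arr.getD j 0 < 0
        · rw [if_pos hneg] at hc; cases hc; exact ⟨le_refl _, h, hneg⟩
        · rw [if_neg hneg] at hc
          obtain ⟨h1, h2, h3⟩ := ih (j + 1) i (by omega) hc
          exact ⟨by omega, h2, h3⟩
      · rw [pvFirstNegA, dif_neg h] at hc; cases hc

theorem pv_fn_some_props (arr : List Int) (j i : Nat) (hc : pvFirstNegA arr j = some i) :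
    j ≤ i ∧ i < arr.length ∧ arr.getD i 0 < 0 :=
  pv_fn_some_props_aux arr (arr.length - j) j i (le_refl _) hc

theorem pv_fn_pos_step (arr : List Int) (j : Nat) (hj : arr.getD j 0 > 0) :
    pvFirstNegA arr j = pvFirstNegA arr (j + 1) := by
  by_cases h : j < arr.length
  · rw [pvFirstNegA, dif_pos h, if_neg (by omega)]
  · rw [pvFirstNegA, dif_neg h, pvFirstNegA, dif_neg (by omega)]

theorem pv_getD_oob (arr : List Int) (j : Nat) (h : ¬ j < arr.length) : arr.getD j 0 = 0 := by
  rw [List.getD_eq_getElem?_getD, List.getElem?_eq_none (by omega)]; rfl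

theorem pv_swapA_main :
    ∀ (fuel : Nat) (arr : List Int) (ind : Nat) (cs : List (List Int)),
      arr.getD ind 0 > 0 → arr.length - ind ≤ fuel →
      pvSwapA (fuel + 1) arr ind cs = pvLoopB arr ind (arr.getD ind 0) (ind + 1) cs := by
  intro fuel
  induction fuel with
  | zero =>
      intro arr ind cs hpos hf
      have hlt : ¬ ind < arr.length := by omega
      rw [pv_getD_oob arr ind hlt] at hpos
      omega
  | succ f ih =>
      intro arr ind cs hpos hf
      rw [pvSwapA]
      rw [pv_fn_pos_step arr ind hpos]
      cases hfn : pvFirstNegA arr (ind + 1) with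
      | none => simp only; rw [pv_fn_none_loop arr ind _ cs (ind + 1) hfn]
      | some i =>
          obtain ⟨hle, hilt, hneg⟩ := pv_fn_some_props arr (ind + 1) i hfn
          rw [pv_fn_some_skip arr ind _ cs (ind + 1) i hfn]
          rw [pvLoopB]
          simp only [hilt, dif_pos, if_pos hneg]
          set arr2 := (arr.set i (arr.getD ind 0 - ((i : Int) - (ind : Int)))).set ind
            (arr.getD i 0 + ((i : Int) - (ind : Int))) with harr2
          by_cases hpos2 : arr2.getD i 0 > 0
          · simp only [if_pos hpos2]
            have hlen2 : arr2.length = arr.length := by simp [harr2]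
            cases f with
            | zero =>
                exfalso
                have : ind < arr.length := by omega
                omega
            | succ f' =>
                rw [ih arr2 i _ hpos2 (by omega)]
          · simp only [if_neg hpos2]

theorem pv_swapA_acc :
    ∀ (fuel : Nat) (arr : List Int) (ind : Nat) (cs : List (List Int)),
      pvSwapA fuel arr ind cs
        = ((pvSwapA fuel arr ind []).1, cs ++ (pvSwapA fuel arr ind []).2) := by
  intro fuel
  induction fuel with
  | zero => intro arr ind cs; simp [pvSwapA]
  | succ f ih =>
      intro arr ind cs
      rw [pvSwapA, pvSwapA]
      cases hfn : pvFirstNegA arr ind with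
      | none => simp
      | some i =>
          simp only
          set arr2 := (arr.set i (arr.getD ind 0 - ((i : Int) - (ind : Int)))).set ind
            (arr.getD i 0 + ((i : Int) - (ind : Int)))
          by_cases hpos2 : arr2.getD i 0 > 0
          · simp only [if_pos hpos2]
            rw [ih arr2 i (cs ++ [[(ind : Int) + 1, (i : Int) + 1]]),
                ih arr2 i ([] ++ [[(ind : Int) + 1, (i : Int) + 1]])]
            simp
          · have hp : ¬ 0 < arr2[i]?.getD 0 := by
              simpa [List.getD_eq_getElem?_getD] using hpos2
            simp [if_neg hp]

theorem pv_step_eq : pvStepA = pvStepB := by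
  funext st z
  unfold pvStepA pvStepB
  by_cases hpos : st.1.getD z.toNat 0 > 0
  · simp only [if_pos hpos]
    rw [pv_swapA_acc (st.1.length + 1) st.1 z.toNat]
    have := pv_swapA_main st.1.length st.1 z.toNat st.2 hpos (by omega)
    rw [pv_swapA_acc (st.1.length + 1) st.1 z.toNat st.2] at this
    exact this
  · rw [if_neg hpos, if_neg hpos]

-- ===== VERDICT (by name: the statement is the Claim_ definition above) =====
theorem minimum_cost_to_sort_permutation_spec : Claim_equal_minimum_cost_to_sort_permutation := by
  intro N P _ _
  unfold Spec_minimum_cost_to_sort_permutation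
  unfold minimum_cost_to_sort_permutation minimum_cost_to_sort_permutation_alt
  simp only [pv_step_eq, pv_sum_foldl, zero_add]
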